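-- pv_equiv track=rewrite | github.com/2kodevs/cooperAItive | src/games/domino/players/strategies/utils/game.py | remaining_pieces
-- ===== SOURCE A (Python) =====
-- def remaining_pieces(pieces, max_number=7):
--     remaining = []
--     taken = set()
--     for player in pieces:
--         for a, b in player:
--             taken.add((min(a, b), max(a, b)))
--     for i in range(max_number + 1):
--         for j in range(i, max_number + 1):
--             if (i,j) not in taken:
--                 remaining.append((i, j))
--     return remaining
-- ===== SOURCE B (Python) =====
-- def remaining_pieces(pieces, max_number=7):
--     # Start from the full ordered dict of canonical dominoes and DELETE each
--     # played piece from it; what survives (in enumeration order) is the answer.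
--     remaining = {(i, j): None
--                  for i in range(max_number + 1) for j in range(i, max_number + 1)}
--     for player in pieces:
--         for a, b in player:
--             remaining.pop((a, b) if a <= b else (b, a), None)
--     return list(remaining)
-- ===== Notes on version B (the rewrite author's own statement) =====
-- stated objective: idiomatic
-- what changed: Instead of accumulating a taken-set and then enumerating every (i,j) with a membership test, B builds the full ordered dict of canonical dominoes once and deletes each played piece from it; the surviving keys, already in enumeration order, are the result.
import Mathlib
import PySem

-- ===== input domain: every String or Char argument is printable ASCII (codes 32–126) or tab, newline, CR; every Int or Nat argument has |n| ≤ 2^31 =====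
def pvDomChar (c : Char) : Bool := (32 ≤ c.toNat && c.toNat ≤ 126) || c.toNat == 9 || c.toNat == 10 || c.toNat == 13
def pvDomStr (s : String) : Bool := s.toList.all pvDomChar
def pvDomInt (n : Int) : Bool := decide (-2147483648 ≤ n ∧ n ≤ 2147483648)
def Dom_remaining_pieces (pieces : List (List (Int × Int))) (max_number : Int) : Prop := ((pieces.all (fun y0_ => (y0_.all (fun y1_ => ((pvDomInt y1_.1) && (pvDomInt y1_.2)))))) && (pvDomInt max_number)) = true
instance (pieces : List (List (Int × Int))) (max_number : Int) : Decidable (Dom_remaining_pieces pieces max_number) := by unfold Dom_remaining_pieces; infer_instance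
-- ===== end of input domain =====

-- B builds the full ordered dict of canonical dominoes and deletes each played piece from it
-- (no taken set, no per-cell membership test); idiomatic deletion-based rewrite, same cost.

-- ===== PORT A =====
def remaining_pieces (pieces : List (List (Int × Int))) (max_number : Int) : List (Int × Int) :=
  let taken : PySem.Set (Int × Int) :=
    pieces.foldl (fun t player =>
      player.foldl (fun t ab => PySem.Set.add t (min ab.1 ab.2, max ab.1 ab.2)) t) PySem.Set.empty
  (PySem.List.pyRange 0 (max_number + 1) 1).foldl (fun remaining i =>
    (PySem.List.pyRange i (max_number + 1) 1).foldl (fun remaining j =>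
      if ¬ (PySem.Set.contains taken (i, j) = true) then remaining ++ [(i, j)] else remaining)
      remaining) []

-- ===== PORT B =====
-- the dict comprehension {(i,j): None ...} → Dict.ofList of ((i,j), none) pairs; remaining.pop(k, None) → Dict.erase
-- (the discarded returned value has no effect on the dict); list(d) → d.keys.
def remaining_pieces_alt (pieces : List (List (Int × Int))) (max_number : Int) : List (Int × Int) :=
  let remaining0 : PySem.Dict (Int × Int) (Option Unit) :=
    PySem.Dict.ofList ((PySem.List.pyRange 0 (max_number + 1) 1).flatMap (fun i =>
      (PySem.List.pyRange i (max_number + 1) 1).map (fun j => ((i, j), (none : Option Unit)))))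
  let remaining := pieces.foldl (fun d player =>
    player.foldl (fun d ab =>
      PySem.Dict.erase d (if ab.1 ≤ ab.2 then (ab.1, ab.2) else (ab.2, ab.1))) d) remaining0
  remaining.keys

-- ===== PRECONDITION & SPEC =====
def Spec_remaining_pieces (pieces : List (List (Int × Int))) (max_number : Int) (out : List (Int × Int)) : Prop := out = remaining_pieces_alt pieces max_number
instance (pieces : List (List (Int × Int))) (max_number : Int) (out : List (Int × Int)) : Decidable (Spec_remaining_pieces pieces max_number out) := by unfold Spec_remaining_pieces; infer_instance

-- ===== CLAIM (what is proved, stated in full; the proofs are below) =====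
def Claim_equal_remaining_pieces : Prop := ∀ (pieces : List (List (Int × Int))) (max_number : Int), Dom_remaining_pieces pieces max_number → Spec_remaining_pieces pieces max_number (remaining_pieces pieces max_number)

-- ===== LEMMAS AND PROOFS =====

-- the canonical enumeration list for a given bound
def allList (m : Int) : List (Int × Int) :=
  (PySem.List.pyRange 0 (m + 1) 1).flatMap (fun i =>
    (PySem.List.pyRange i (m + 1) 1).map (fun j => (i, j)))

theorem allList_pairwise (m : Int) :
    (allList m).Pairwise (fun a b => a.1 < b.1 ∨ (a.1 = b.1 ∧ a.2 < b.2)) := by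
  unfold allList
  rw [List.flatMap_def, List.pairwise_flatten]
  constructor
  · intro l hl
    simp only [List.mem_map] at hl
    obtain ⟨i, _, rfl⟩ := hl
    refine List.Pairwise.map _ ?_ (PySem.List.pairwise_lt_pyRange_one i (m + 1))
    intro a b hab
    right; exact ⟨rfl, hab⟩
  · refine List.Pairwise.map _ ?_ (PySem.List.pairwise_lt_pyRange_one 0 (m + 1))
    intro i1 i2 h12 x hx y hy
    simp only [List.mem_map] at hx hy
    obtain ⟨j1, _, rfl⟩ := hx
    obtain ⟨j2, _, rfl⟩ := hy
    left; exact h12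

theorem allList_nodup (m : Int) : (allList m).Nodup := by
  refine (allList_pairwise m).imp ?_
  rintro a b (h | ⟨h1, h2⟩) <;> intro he <;> subst he <;> omega

-- the normalised (min, max) flattening of the played pieces
def flatTaken (pieces : List (List (Int × Int))) : List (Int × Int) :=
  pieces.flatMap (fun player => player.map (fun ab => (min ab.1 ab.2, max ab.1 ab.2)))

-- ---- A reduces to a filter of allList ----

theorem taken_eq (pieces : List (List (Int × Int))) :
    pieces.foldl (fun t player =>
      player.foldl (fun t ab => PySem.Set.add t (min ab.1 ab.2, max ab.1 ab.2)) t) PySem.Set.empty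
    = PySem.Set.ofList (flatTaken pieces) := by
  rw [flatTaken, PySem.Set.ofList_eq_foldl, List.foldl_flatMap]
  refine PySem.List.foldl_congr_mem _ _ _ _ ?_
  intro t player _
  rw [List.foldl_map]

theorem remaining_pieces_eq_filter (pieces : List (List (Int × Int))) (max_number : Int) :
    remaining_pieces pieces max_number =
      (allList max_number).filter (fun p =>
        !PySem.Set.contains (PySem.Set.ofList (flatTaken pieces)) p) := by
  unfold remaining_pieces
  rw [taken_eq]
  set t := PySem.Set.ofList (flatTaken pieces) with ht
  have inner : ∀ (i : Int) (acc : List (Int × Int)),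
      (PySem.List.pyRange i (max_number + 1) 1).foldl (fun remaining j =>
        if ¬ (PySem.Set.contains t (i, j) = true) then remaining ++ [(i, j)] else remaining) acc
      = acc ++ ((PySem.List.pyRange i (max_number + 1) 1).map (fun j => (i, j))).filter
          (fun p => !PySem.Set.contains t p) := by
    intro i acc
    rw [PySem.List.foldl_append_ite (fun j => ¬ (PySem.Set.contains t (i, j) = true))
      (fun j => (i, j))]
    congr 1
    rw [List.filter_map]
    congr 1
    apply List.filter_congr
    intro j _
    simp [Function.comp]
  calc (PySem.List.pyRange 0 (max_number + 1) 1).foldl (fun remaining i =>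
        (PySem.List.pyRange i (max_number + 1) 1).foldl (fun remaining j =>
          if ¬ (PySem.Set.contains t (i, j) = true) then remaining ++ [(i, j)] else remaining)
          remaining) []
      = (PySem.List.pyRange 0 (max_number + 1) 1).foldl (fun remaining i =>
          remaining ++ ((PySem.List.pyRange i (max_number + 1) 1).map (fun j => (i, j))).filter
            (fun p => !PySem.Set.contains t p)) [] := by
        exact PySem.List.foldl_congr_mem _ _ _ _ (fun acc i _ => inner i acc)
    _ = _ := by
        rw [PySem.List.foldl_append_eq_flatMap]
        simp only [List.nil_append, allList]
        rw [List.flatMap_def, List.flatMap_def, List.filter_flatten, List.map_map]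
        rfl

-- ---- B reduces to the same filter ----

theorem if_swap_eq_minmax (a b : Int) :
    (if a ≤ b then (a, b) else (b, a)) = (min a b, max a b) := by
  split_ifs with h <;> simp [min_def, max_def, h]

theorem items_foldl_erase (ks : List (Int × Int)) (d : PySem.Dict (Int × Int) (Option Unit)) :
    (ks.foldl PySem.Dict.erase d).items = d.items.filter (fun p => !decide (p.1 ∈ ks)) := by
  induction ks generalizing d with
  | nil => simp
  | cons k ks ih =>
    rw [List.foldl_cons, ih]
    show (List.filter _ (d.items.filter fun p => !(p.1 == k))) = _
    rw [List.filter_filter]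
    apply List.filter_congr
    intro p _
    by_cases h : p.1 = k <;> by_cases hm : p.1 ∈ ks <;> simp [h, hm]

theorem fromkeys_items (m : Int) :
    (PySem.Dict.ofList ((PySem.List.pyRange 0 (m + 1) 1).flatMap (fun i =>
      (PySem.List.pyRange i (m + 1) 1).map (fun j => ((i, j), (none : Option Unit)))))).items
    = (allList m).map (fun p => (p, (none : Option Unit))) := by
  have hkeys : ((PySem.List.pyRange 0 (m + 1) 1).flatMap (fun i =>
      (PySem.List.pyRange i (m + 1) 1).map (fun j => ((i, j), (none : Option Unit)))))
      = (allList m).map (fun p => (p, (none : Option Unit))) := by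
    unfold allList
    rw [List.flatMap_def, List.flatMap_def, List.map_flatten, List.map_map]
    congr 1
    refine List.map_congr_left fun i _ => ?_
    simp [Function.comp, List.map_map]
  rw [hkeys]
  show (List.foldl
      (fun (acc : PySem.Dict (Int × Int) (Option Unit)) (p : (Int × Int) × Option Unit) =>
        acc.insert p.1 p.2)
      PySem.Dict.empty ((allList m).map (fun p => (p, (none : Option Unit))))).items = _
  have := PySem.Dict.items_foldl_insert_fresh
    ((allList m).map (fun p => (p, (none : Option Unit))))
    (fun p => p.1) (fun p => p.2) PySem.Dict.empty
    (by intro a _; simp [PySem.Dict.contains_empty])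
    (by rw [List.map_map]; exact (allList_nodup m).map (by intro a b h; simpa using h))
  simpa using this

theorem remaining_pieces_alt_eq_filter (pieces : List (List (Int × Int))) (max_number : Int) :
    remaining_pieces_alt pieces max_number =
      (allList max_number).filter (fun p => !decide (p ∈ flatTaken pieces)) := by
  unfold remaining_pieces_alt
  have hfold : pieces.foldl (fun d player =>
      player.foldl (fun d ab =>
        PySem.Dict.erase d (if ab.1 ≤ ab.2 then (ab.1, ab.2) else (ab.2, ab.1))) d)
      (PySem.Dict.ofList ((PySem.List.pyRange 0 (max_number + 1) 1).flatMap (fun i =>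
        (PySem.List.pyRange i (max_number + 1) 1).map (fun j => ((i, j), (none : Option Unit))))))
    = (flatTaken pieces).foldl PySem.Dict.erase
      (PySem.Dict.ofList ((PySem.List.pyRange 0 (max_number + 1) 1).flatMap (fun i =>
        (PySem.List.pyRange i (max_number + 1) 1).map (fun j => ((i, j), (none : Option Unit)))))) := by
    rw [flatTaken, List.foldl_flatMap]
    refine (PySem.List.foldl_congr_mem _ _ _ _ ?_).symm
    intro d player _
    rw [List.foldl_map]
    refine PySem.List.foldl_congr_mem _ _ _ _ ?_
    intro d ab _
    rw [if_swap_eq_minmax]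
  dsimp only
  rw [hfold, PySem.Dict.keys, items_foldl_erase, fromkeys_items, List.filter_map,
    List.map_map]
  simp [Function.comp_def]

-- ===== VERDICT (by name: the statement is the Claim_ definition above) =====
theorem remaining_pieces_spec : Claim_equal_remaining_pieces := by
  intro pieces max_number _
  show remaining_pieces pieces max_number = remaining_pieces_alt pieces max_number
  rw [remaining_pieces_eq_filter, remaining_pieces_alt_eq_filter]
  apply List.filter_congr
  intro p _
  congr 1
  simp [PySem.Set.contains_eq_listContains, PySem.Set.mem_ofList]
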